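-- pv_equiv track=rewrite | github.com/Mohamed-Salama-JHL/Lampa | The_dashboard/map_app/GUI/gridstack_handler.py | find_place
-- ===== SOURCE A (Python) =====
-- def find_place(grid,x_size=3,y_size=2,reverse=False):
--     rows = len(grid)
--     cols = len(grid[0])
--
--     def is_empty_block(x, y):
--         for i in range(x, x + x_size):
--             for j in range(y, y + y_size):
--                 if i >= cols or j >= rows or grid[j][i] != 0:
--                     return False
--         return True
--
--     best_location = None
--     if not reverse:
--         for i in range(cols - x_size + 1):
--             for j in range(rows - y_size + 1):
--                 if is_empty_block(i, j):
--                     best_location = (i, j)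
--                     return best_location
--     elif  reverse:
--         for j in range(rows - y_size + 1):
--             for i in range(cols - x_size + 1):
--                 if is_empty_block(i, j):
--                     best_location = (i, j)
--                     return best_location
--
--     return best_location
-- ===== SOURCE B (Python) =====
-- def find_place(grid, x_size=3, y_size=2, reverse=False):
--     rows = len(grid)
--     cols = len(grid[0])
--     nx = cols - x_size + 1
--     ny = rows - y_size + 1
--     if nx <= 0 or ny <= 0:
--         return None
--     if x_size <= 0 or y_size <= 0:
--         # a non-positive block is trivially empty: first scanned position
--         return (0, 0)
--     # ok[j][i]: row j is all zero on columns [i, i + x_size)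
--     ok = []
--     for row in grid:
--         run = 0
--         runs = [0] * cols
--         for i in range(cols - 1, -1, -1):
--             run = run + 1 if row[i] == 0 else 0
--             runs[i] = run
--         ok.append([runs[i] >= x_size for i in range(nx)])
--     # v[j][i]: number of consecutive rows starting at j whose ok[.][i] holds
--     v = []
--     prev = [0] * nx
--     for j in range(rows - 1, -1, -1):
--         prev = [prev[i] + 1 if ok[j][i] else 0 for i in range(nx)]
--         v.append(prev)
--     v.reverse()
--     if not reverse:
--         for i in range(nx):
--             for j in range(ny):
--                 if v[j][i] >= y_size:
--                     return (i, j)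
--     else:
--         for j in range(ny):
--             for i in range(nx):
--                 if v[j][i] >= y_size:
--                     return (i, j)
--     return None
-- ===== Notes on version B (the rewrite author's own statement) =====
-- stated objective: alternative
-- what changed: A re-scans an x_size*y_size block at every candidate position; B instead precomputes per-row zero-run lengths and then consecutive-ok-row counts (two linear DP passes) and tests each position in O(1) against that table; A's early exit makes the two comparable on the timed inputs.
-- outside the precondition, e.g. on find_place([[1, 1, 1], [0]], 1, 1, False): A returns (0, 1), B raises IndexError
import Mathlib
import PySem

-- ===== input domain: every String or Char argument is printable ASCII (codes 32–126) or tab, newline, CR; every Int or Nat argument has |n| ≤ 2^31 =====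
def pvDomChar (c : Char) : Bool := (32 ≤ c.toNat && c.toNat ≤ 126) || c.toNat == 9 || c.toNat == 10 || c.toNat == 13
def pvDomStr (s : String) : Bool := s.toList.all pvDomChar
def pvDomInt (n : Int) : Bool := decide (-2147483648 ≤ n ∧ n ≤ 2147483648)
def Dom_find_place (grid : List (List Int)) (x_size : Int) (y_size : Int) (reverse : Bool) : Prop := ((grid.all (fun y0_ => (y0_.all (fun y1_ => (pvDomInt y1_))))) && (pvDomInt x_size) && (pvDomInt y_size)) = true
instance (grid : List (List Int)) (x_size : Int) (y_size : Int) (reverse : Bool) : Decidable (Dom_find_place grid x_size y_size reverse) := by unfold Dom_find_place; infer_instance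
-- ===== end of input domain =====

-- B replaces A's per-position x_size×y_size block rescans by a run-length DP (zero-run
-- lengths per row, then consecutive-ok-row counts), a different algorithm of similar cost.

-- ===== PORT A =====
def pvCell (grid : List (List Int)) (j i : Int) : Int :=
  PySem.List.pyGetD (PySem.List.pyGetD grid j []) i 0

def pvIsEmptyBlock (grid : List (List Int)) (cols rows x_size y_size x y : Int) : Bool :=
  (PySem.List.pyRange x (x + x_size) 1).all fun i =>
    (PySem.List.pyRange y (y + y_size) 1).all fun j =>
      !(decide (cols ≤ i) || decide (rows ≤ j) || decide (pvCell grid j i ≠ 0))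

-- 'for v in range(a, b): …maybe return…' with early return, transliterated as recursion
def pvForRange (a b : Int) (f : Int → Option (Int × Int)) : Option (Int × Int) :=
  if h : a < b then
    match f a with
    | some r => some r
    | none => pvForRange (a + 1) b f
  else none
termination_by (b - a).toNat
decreasing_by omega

def find_place (grid : List (List Int)) (x_size : Int) (y_size : Int) (reverse : Bool) : Option (Int × Int) :=
  let rows : Int := grid.length
  let cols : Int := (PySem.List.pyGetD grid 0 []).length
  if !reverse then
    pvForRange 0 (cols - x_size + 1) fun i =>
      pvForRange 0 (rows - y_size + 1) fun j =>
        if pvIsEmptyBlock grid cols rows x_size y_size i j then some (i, j) else none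
  else
    pvForRange 0 (rows - y_size + 1) fun j =>
      pvForRange 0 (cols - x_size + 1) fun i =>
        if pvIsEmptyBlock grid cols rows x_size y_size i j then some (i, j) else none

-- ===== PORT B =====
-- zero-run lengths: pvRuns row ! i = length of the run of zeros starting at position i
def pvRuns (row : List Int) : List Int :=
  match row with
  | [] => []
  | a :: t =>
      let r := pvRuns t
      (if a = 0 then r.headD 0 + 1 else 0) :: r

def pvOkRow (x_size : Int) (nx : Nat) (row : List Int) : List Bool :=
  (List.range nx).map fun i => decide (x_size ≤ (pvRuns row).getD i 0)

-- consecutive-ok-row counts, computed bottom-up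
def pvVRows (nx : Nat) (oks : List (List Bool)) : List (List Int) :=
  match oks with
  | [] => []
  | o :: t =>
      let rest := pvVRows nx t
      let prev := rest.headD (List.replicate nx 0)
      ((List.range nx).map fun i => if o.getD i false then prev.getD i 0 + 1 else 0) :: rest

def find_place_alt (grid : List (List Int)) (x_size : Int) (y_size : Int) (reverse : Bool) : Option (Int × Int) :=
  let rows : Int := grid.length
  let cols : Int := (PySem.List.pyGetD grid 0 []).length
  let nx := cols - x_size + 1
  let ny := rows - y_size + 1
  if nx ≤ 0 ∨ ny ≤ 0 then none
  else if x_size ≤ 0 ∨ y_size ≤ 0 then some (0, 0)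
  else
    let nx' := nx.toNat
    let v := pvVRows nx' (grid.map (pvOkRow x_size nx'))
    if !reverse then
      (List.range nx').findSome? fun i =>
        (List.range ny.toNat).findSome? fun j =>
          if y_size ≤ (v.getD j []).getD i 0 then some ((i : Int), (j : Int)) else none
    else
      (List.range ny.toNat).findSome? fun j =>
        (List.range nx').findSome? fun i =>
          if y_size ≤ (v.getD j []).getD i 0 then some ((i : Int), (j : Int)) else none

-- ===== PRECONDITION & SPEC =====
-- Pre_ excludes the empty grid (A raises IndexError on grid[0]) and ragged grids that A actually
-- scans (some row shorter than row 0 while a block could fit), on which A may raise IndexError or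
-- return a value that depends on which short cell is probed first; B raises IndexError there.
def Pre_find_place (grid : List (List Int)) (x_size : Int) (y_size : Int) (reverse : Bool) : Prop :=
  grid ≠ [] ∧
    ((grid.headD []).length - x_size + 1 ≤ 0 ∨ (grid.length : Int) - y_size + 1 ≤ 0 ∨
      x_size ≤ 0 ∨ y_size ≤ 0 ∨
      ∀ row ∈ grid, (grid.headD []).length ≤ row.length)
instance (grid : List (List Int)) (x_size : Int) (y_size : Int) (reverse : Bool) : Decidable (Pre_find_place grid x_size y_size reverse) := by unfold Pre_find_place; infer_instance

def pvWitness_find_place : List (List Int) × Int × Int × Bool := ([[0, 1, 0], [0, 0, 0]], 2, 1, false)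

def Spec_find_place (grid : List (List Int)) (x_size : Int) (y_size : Int) (reverse : Bool) (out : Option (Int × Int)) : Prop := out = find_place_alt grid x_size y_size reverse
instance (grid : List (List Int)) (x_size : Int) (y_size : Int) (reverse : Bool) (out : Option (Int × Int)) : Decidable (Spec_find_place grid x_size y_size reverse out) := by unfold Spec_find_place; infer_instance

-- ===== CLAIM (what is proved, stated in full; the proofs are below) =====
def Claim_equal_find_place : Prop := ∀ (grid : List (List Int)) (x_size : Int) (y_size : Int) (reverse : Bool), Dom_find_place grid x_size y_size reverse → Pre_find_place grid x_size y_size reverse → Spec_find_place grid x_size y_size reverse (find_place grid x_size y_size reverse)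

-- ===== LEMMAS AND PROOFS =====

theorem pv_findSome?_congr {α β : Type} (l : List α) (f g : α → Option β)
    (h : ∀ x ∈ l, f x = g x) : l.findSome? f = l.findSome? g := by
  induction l with
  | nil => rfl
  | cons a t ih =>
      simp only [List.findSome?_cons, h a (List.mem_cons_self)]
      cases g a with
      | none => exact ih fun x hx => h x (List.mem_cons_of_mem _ hx)
      | some b => rfl

theorem pv_findSome?_none {α β : Type} (l : List α) (f : α → Option β)
    (h : ∀ x ∈ l, f x = none) : l.findSome? f = none := by
  rw [pv_findSome?_congr l f (fun _ => none) h]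
  exact List.findSome?_eq_none_iff.mpr fun x _ => rfl

theorem pvForRange_eq_findSome? (a b : Int) (f : Int → Option (Int × Int)) :
    pvForRange a b f = (PySem.List.pyRange a b 1).findSome? f := by
  by_cases h : a < b
  · rw [pvForRange, dif_pos h, PySem.List.pyRange_one_cons h, List.findSome?_cons]
    cases hfa : f a with
    | some r => rfl
    | none => exact pvForRange_eq_findSome? (a + 1) b f
  · rw [pvForRange, dif_neg h, PySem.List.pyRange_one_eq_nil (by omega)]
    rfl
termination_by (b - a).toNat
decreasing_by omega

theorem pvRuns_nonneg (row : List Int) (i : Nat) : 0 ≤ (pvRuns row).getD i 0 := by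
  induction row generalizing i with
  | nil => simp [pvRuns, List.getD_eq_getElem?_getD]
  | cons a t ih =>
      cases i with
      | zero =>
          simp only [pvRuns, List.getD_cons_zero]
          split
          · cases h : pvRuns t with
            | nil => simp
            | cons b r =>
                have := ih 0
                rw [h] at this
                simp only [List.getD_cons_zero] at this
                simp only [List.headD]
                omega
          · omega
      | succ i' => simpa [pvRuns] using ih i'

theorem pvRuns_spec (row : List Int) (i k : Nat) (h : i + k ≤ row.length) :
    ((k : Int) ≤ (pvRuns row).getD i 0) ↔ ∀ t < k, row.getD (i + t) 0 = 0 := by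
  induction row generalizing i k with
  | nil =>
      have hk : k = 0 := by simp at h; omega
      subst hk; simpa using pvRuns_nonneg [] i
  | cons a t ih =>
      cases i with
      | zero =>
          cases k with
          | zero => simpa using pvRuns_nonneg (a :: t) 0
          | succ k' =>
              simp only [pvRuns, List.getD_cons_zero]
              constructor
              · intro hle
                by_cases ha : a = 0
                · simp only [ha, if_pos rfl] at hle
                  have hhead : (pvRuns t).headD 0 = (pvRuns t).getD 0 0 := by
                    cases pvRuns t <;> simp [List.headD]
                  have hk' : (k' : Int) ≤ (pvRuns t).getD 0 0 := by
                    rw [hhead] at hle; push_cast at hle ⊢; omega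
                  have := (ih 0 k' (by simp at h ⊢; omega)).mp hk'
                  intro u hu
                  cases u with
                  | zero => simpa using ha
                  | succ u' => simpa using this u' (by omega)
                · simp only [if_neg ha] at hle
                  exfalso; omega
              · intro hall
                have ha : a = 0 := by simpa using hall 0 (by omega)
                simp only [ha, if_pos rfl]
                have : ∀ u < k', t.getD (0 + u) 0 = 0 := by
                  intro u hu
                  simpa using hall (u + 1) (by omega)
                have hk' := (ih 0 k' (by simp at h ⊢; omega)).mpr this
                have hhead : (pvRuns t).headD 0 = (pvRuns t).getD 0 0 := by
                  cases pvRuns t <;> simp [List.headD]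
                rw [hhead]; push_cast; omega
      | succ i' =>
          have := ih i' k (by simp at h ⊢; omega)
          simp only [pvRuns, List.getD_cons_succ]
          rw [this]
          constructor
          · intro hall u hu; simpa [Nat.succ_add, Nat.add_right_comm] using hall u hu
          · intro hall u hu; simpa [Nat.succ_add, Nat.add_right_comm] using hall u hu

theorem pvVRows_length (nx : Nat) (oks : List (List Bool)) : (pvVRows nx oks).length = oks.length := by
  induction oks with
  | nil => rfl
  | cons o t ih => simp [pvVRows, ih]

theorem pvVRows_nonneg (nx : Nat) (oks : List (List Bool)) (j i : Nat) :
    0 ≤ ((pvVRows nx oks).getD j []).getD i 0 := by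
  induction oks generalizing j i with
  | nil => simp [pvVRows, List.getD_eq_getElem?_getD]
  | cons o t ih =>
      cases j with
      | zero =>
          simp only [pvVRows, List.getD_cons_zero]
          by_cases hi : i < nx
          · rw [List.getD_eq_getElem?_getD]
            simp only [List.getElem?_map, List.getElem?_range hi]
            simp only [Option.map_some, Option.getD_some]
            split
            · have hh : ((pvVRows nx t).headD (List.replicate nx 0)).getD i 0 =
                  ((pvVRows nx t).getD 0 []).getD i 0 ∨
                  ((pvVRows nx t).headD (List.replicate nx 0)).getD i 0 = 0 := by
                cases pvVRows nx t with
                | nil => right; simp [List.headD, List.getD_replicate]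
                | cons b r => left; simp [List.headD]
              rcases hh with hh | hh <;> rw [hh]
              · have := ih 0 i; omega
              · omega
            · omega
          · rw [List.getD_eq_getElem?_getD]
            rw [List.getElem?_eq_none (by simpa using Nat.le_of_not_lt hi)]
            simp
      | succ j' => simpa [pvVRows] using ih j' i

theorem pvVRows_spec (nx : Nat) (oks : List (List Bool)) (j k i : Nat)
    (h : j + k ≤ oks.length) (hi : i < nx) :
    ((k : Int) ≤ ((pvVRows nx oks).getD j []).getD i 0) ↔
      ∀ t < k, (oks.getD (j + t) []).getD i false = true := by
  induction oks generalizing j k with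
  | nil =>
      have hk : k = 0 := by simp at h; omega
      subst hk; simpa using pvVRows_nonneg nx [] j i
  | cons o t ih =>
      cases j with
      | zero =>
          cases k with
          | zero => simpa using pvVRows_nonneg nx (o :: t) 0 i
          | succ k' =>
              simp only [pvVRows, List.getD_cons_zero]
              have hget : (((List.range nx).map fun i =>
                  if o.getD i false then ((pvVRows nx t).headD (List.replicate nx 0)).getD i 0 + 1 else 0).getD i 0)
                  = if o.getD i false then ((pvVRows nx t).headD (List.replicate nx 0)).getD i 0 + 1 else 0 := by
                rw [List.getD_eq_getElem?_getD]
                simp [List.getElem?_map, List.getElem?_range hi]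
              rw [hget]
              have hhead : ((pvVRows nx t).headD (List.replicate nx 0)).getD i 0 =
          ((pvVRows nx t).getD 0 []).getD i 0 := by
                cases htt : pvVRows nx t with
                | nil =>
                    have : t = [] := by
                      have := pvVRows_length nx t; rw [htt] at this; simpa using (List.length_eq_zero_iff).mp this.symm
                    simp [List.headD, List.getD_replicate]
                | cons b r => simp [List.headD]
              constructor
              · intro hle
                by_cases ho : o.getD i false = true
                · rw [if_pos ho, hhead] at hle
                  have hk' : (k' : Int) ≤ ((pvVRows nx t).getD 0 []).getD i 0 := by push_cast at hle ⊢; omega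
                  have := (ih 0 k' (by simp at h ⊢; omega)).mp hk'
                  intro u hu
                  cases u with
                  | zero => simpa using ho
                  | succ u' => simpa using this u' (by omega)
                · rw [if_neg ho] at hle; exfalso; omega
              · intro hall
                have ho : o.getD i false = true := by simpa using hall 0 (by omega)
                rw [if_pos ho, hhead]
                have : ∀ u < k', (t.getD (0 + u) []).getD i false = true := by
                  intro u hu; simpa using hall (u + 1) (by omega)
                have hk' := (ih 0 k' (by simp at h ⊢; omega)).mpr this
                push_cast at hk' ⊢; omega
      | succ j' =>
          have := ih j' k (by simp at h ⊢; omega)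
          simp only [pvVRows, List.getD_cons_succ]
          rw [this]
          constructor
          · intro hall u hu; simpa [Nat.succ_add, Nat.add_right_comm] using hall u hu
          · intro hall u hu; simpa [Nat.succ_add, Nat.add_right_comm] using hall u hu

-- pointwise agreement of the two block-emptiness tests, in the main case
theorem pv_pointwise (grid : List (List Int)) (x_size y_size : Int)
    (cols : Int) (hcols : cols = ((grid.headD []).length : Int))
    (hx : 1 ≤ x_size) (hy : 1 ≤ y_size)
    (hrect : ∀ row ∈ grid, (grid.headD []).length ≤ row.length)
    (i j : Nat) (hi : (i : Int) < cols - x_size + 1) (hj : (j : Int) < (grid.length : Int) - y_size + 1) :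
    pvIsEmptyBlock grid cols (grid.length : Int) x_size y_size (i : Int) (j : Int) =
      decide (y_size ≤ (((pvVRows (cols - x_size + 1).toNat (grid.map (pvOkRow x_size (cols - x_size + 1).toNat))).getD j []).getD i 0)) := by
  have hcols0 : 0 ≤ cols := by rw [hcols]; exact_mod_cast Nat.zero_le _
  set nx' := (cols - x_size + 1).toNat with hnxdef
  have hnx : (nx' : Int) = cols - x_size + 1 := Int.toNat_of_nonneg (by omega)
  have hi' : i < nx' := by omega
  have hys : (y_size.toNat : Int) = y_size := Int.toNat_of_nonneg (by omega)
  have hlen : j + y_size.toNat ≤ (grid.map (pvOkRow x_size nx')).length := by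
    rw [List.length_map]
    omega
  -- the common characterisation: every cell of the block is zero
  have hB := pvVRows_spec nx' (grid.map (pvOkRow x_size nx')) j y_size.toNat i hlen hi'
  rw [hys] at hB
  have hxs : (x_size.toNat : Int) = x_size := Int.toNat_of_nonneg (by omega)
  have hrow : ∀ t < y_size.toNat,
      ((grid.map (pvOkRow x_size nx')).getD (j + t) []).getD i false = true ↔
        ∀ u < x_size.toNat, (grid.getD (j + t) []).getD (i + u) 0 = 0 := by
    intro t ht
    have hjt : j + t < grid.length := by omega
    have hmap : (grid.map (pvOkRow x_size nx')).getD (j + t) [] =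
        pvOkRow x_size nx' (grid.getD (j + t) []) := by
      rw [List.getD_eq_getElem?_getD, List.getD_eq_getElem?_getD, List.getElem?_map,
        List.getElem?_eq_getElem hjt]
      rfl
    rw [hmap]
    have hok : (pvOkRow x_size nx' (grid.getD (j + t) [])).getD i false =
        decide (x_size ≤ (pvRuns (grid.getD (j + t) [])).getD i 0) := by
      unfold pvOkRow
      rw [List.getD_eq_getElem?_getD, List.getElem?_map, List.getElem?_range hi']
      rfl
    rw [hok, decide_eq_true_iff]
    have hmem : grid.getD (j + t) [] ∈ grid := by
      rw [List.getD_eq_getElem?_getD, List.getElem?_eq_getElem hjt]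
      exact List.getElem_mem _
    have hrl : i + x_size.toNat ≤ (grid.getD (j + t) []).length := by
      have := hrect _ hmem
      omega
    have := pvRuns_spec (grid.getD (j + t) []) i x_size.toNat hrl
    rw [hxs] at this
    exact this
  have hBC : (y_size ≤ ((pvVRows nx' (grid.map (pvOkRow x_size nx'))).getD j []).getD i 0) ↔
      (∀ t < y_size.toNat, ∀ u < x_size.toNat, (grid.getD (j + t) []).getD (i + u) 0 = 0) := by
    rw [hB]
    exact forall_congr' fun t => forall_congr' fun ht => hrow t ht
  rw [Bool.eq_iff_iff, decide_eq_true_iff, hBC]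
  unfold pvIsEmptyBlock
  simp only [List.all_eq_true, PySem.List.mem_pyRange_one, Bool.not_eq_eq_eq_not, Bool.not_true,
    Bool.or_eq_false_iff, decide_eq_false_iff_not, not_le, not_not, and_imp, pvCell]
  constructor
  · intro h t ht u hu
    have h1 := h ((i : Int) + u) (by omega) (by omega) ((j : Int) + t) (by omega) (by omega)
    have h2 := h1.2
    rw [show (i : Int) + (u : Int) = ((i + u : Nat) : Int) by push_cast; ring,
        show (j : Int) + (t : Int) = ((j + t : Nat) : Int) by push_cast; ring,
        PySem.List.pyGetD_natCast, PySem.List.pyGetD_natCast] at h2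
    exact h2
  · intro h a ha1 ha2 b hb1 hb2
    refine ⟨⟨by omega, by omega⟩, ?_⟩
    have hu : a = (i : Int) + ((a - i).toNat : Int) := by omega
    have ht : b = (j : Int) + ((b - j).toNat : Int) := by omega
    have h2 := h (b - j).toNat (by omega) (a - i).toNat (by omega)
    rw [hu, ht,
        show (i : Int) + ((a - i).toNat : Int) = ((i + (a - i).toNat : Nat) : Int) by push_cast; ring,
        show (j : Int) + ((b - j).toNat : Int) = ((j + (b - j).toNat : Nat) : Int) by push_cast; ring,
        PySem.List.pyGetD_natCast, PySem.List.pyGetD_natCast]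
    exact h2

-- ===== VERDICT (by name: the statement is the Claim_ definition above) =====
theorem find_place_spec : Claim_equal_find_place := by
  intro grid x_size y_size reverse hdom hpre
  obtain ⟨hne, hcase⟩ := hpre
  unfold Spec_find_place
  have h0 : PySem.List.pyGetD grid 0 [] = grid.headD [] := by
    cases grid with
    | nil => exact absurd rfl hne
    | cons g0 gt => simp [PySem.List.pyGetD_ofNat']
  simp only [find_place, find_place_alt, h0, pvForRange_eq_findSome?]
  by_cases htriv : ((((grid.headD []).length : Int)) - x_size + 1 ≤ 0 ∨ ((grid.length : Int)) - y_size + 1 ≤ 0)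
  · rw [if_pos htriv]
    rcases htriv with hnx | hny
    · have hempty : PySem.List.pyRange 0 (((grid.headD []).length : Int) - x_size + 1) = [] :=
        PySem.List.pyRange_one_eq_nil (by omega)
      cases reverse
      · rw [if_pos (by rfl : (!false) = true), hempty]; rfl
      · rw [if_neg (by simp : ¬(!true) = true)]
        exact pv_findSome?_none _ _ fun x hx => by rw [hempty]; rfl
    · have hempty : PySem.List.pyRange 0 (((grid.length : Int)) - y_size + 1) = [] :=
        PySem.List.pyRange_one_eq_nil (by omega)
      cases reverse
      · rw [if_pos (by rfl : (!false) = true)]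
        exact pv_findSome?_none _ _ fun x hx => by rw [hempty]; rfl
      · rw [if_neg (by simp : ¬(!true) = true), hempty]; rfl
  · rw [if_neg htriv]
    push_neg at htriv
    obtain ⟨hnx1, hny1⟩ := htriv
    by_cases hdeg : x_size ≤ 0 ∨ y_size ≤ 0
    · rw [if_pos hdeg]
      have hblk : ∀ x y : Int, pvIsEmptyBlock grid (((grid.headD []).length : Int)) ((grid.length : Int)) x_size y_size x y = true := by
        intro x y
        unfold pvIsEmptyBlock
        rcases hdeg with h | h
        · rw [PySem.List.pyRange_one_eq_nil (by omega : x + x_size ≤ x)]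
          rfl
        · have hin : PySem.List.pyRange y (y + y_size) = [] := PySem.List.pyRange_one_eq_nil (by omega)
          simp [hin]
      cases reverse
      · rw [if_pos (by rfl : (!false) = true),
          PySem.List.pyRange_one_cons (by omega : (0:Int) < ((grid.headD []).length : Int) - x_size + 1),
          List.findSome?_cons,
          PySem.List.pyRange_one_cons (by omega : (0:Int) < ((grid.length : Int)) - y_size + 1),
          List.findSome?_cons, hblk 0 0]
        rfl
      · rw [if_neg (by simp : ¬(!true) = true),
          PySem.List.pyRange_one_cons (by omega : (0:Int) < ((grid.length : Int)) - y_size + 1),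
          List.findSome?_cons,
          PySem.List.pyRange_one_cons (by omega : (0:Int) < ((grid.headD []).length : Int) - x_size + 1),
          List.findSome?_cons, hblk 0 0]
        rfl
    · push_neg at hdeg
      rw [if_neg (by omega : ¬(x_size ≤ 0 ∨ y_size ≤ 0))]
      have hrect : ∀ row ∈ grid, (grid.headD []).length ≤ row.length := by
        rcases hcase with h | h | h | h | h
        · omega
        · omega
        · omega
        · omega
        · exact h
      have hkey : ∀ (i j : Nat), (i : Int) < ((grid.headD []).length : Int) - x_size + 1 →
          (j : Int) < ((grid.length : Int)) - y_size + 1 →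
          (if pvIsEmptyBlock grid (((grid.headD []).length : Int)) ((grid.length : Int)) x_size y_size (i : Int) (j : Int) = true
            then some ((i : Int), (j : Int)) else none) =
          (if y_size ≤ (((pvVRows (((grid.headD []).length : Int) - x_size + 1).toNat
                (grid.map (pvOkRow x_size (((grid.headD []).length : Int) - x_size + 1).toNat))).getD j []).getD i 0)
            then some ((i : Int), (j : Int)) else none) := by
        intro i j hi hj
        rw [pv_pointwise grid x_size y_size _ rfl (by omega) (by omega) hrect i j hi hj]
        simp only [decide_eq_true_eq]
      cases reverse
      · rw [if_pos (by rfl : (!false) = true), if_pos (by rfl : (!false) = true),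
          PySem.List.pyRange_zero ((((grid.headD []).length : Int)) - x_size + 1), List.findSome?_map]
        refine pv_findSome?_congr _ _ _ fun i hi => ?_
        simp only [Function.comp_apply]
        rw [PySem.List.pyRange_zero, List.findSome?_map]
        refine pv_findSome?_congr _ _ _ fun j hj => ?_
        simp only [Function.comp_apply]
        exact hkey i j (by simp only [List.mem_range] at hi; omega) (by simp only [List.mem_range] at hj; omega)
      · rw [if_neg (by simp : ¬(!true) = true), if_neg (by simp : ¬(!true) = true),
          PySem.List.pyRange_zero (((grid.length : Int)) - y_size + 1), List.findSome?_map]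
        refine pv_findSome?_congr _ _ _ fun j hj => ?_
        simp only [Function.comp_apply]
        rw [PySem.List.pyRange_zero, List.findSome?_map]
        refine pv_findSome?_congr _ _ _ fun i hi => ?_
        simp only [Function.comp_apply]
        exact hkey i j (by simp only [List.mem_range] at hi; omega) (by simp only [List.mem_range] at hj; omega)
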